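-- pv_equiv track=rewrite | github.com/maximofraisinet/tree-solver | algorithms.py | bfs_generator
-- ===== SOURCE A (Python) =====
-- from collections import deque
-- from typing import Generator, Dict, List, Tuple, Optional
--
-- def bfs_generator(
--     graph: Dict[str, List[str]],
--     start: str,
--     goal: str
-- ) -> Generator[Tuple[str, str, Optional[List[str]]], None, None]:
--     """
--     Breadth-First Search implemented as a generator.
--
--     Yields tuples of (action, node, path_so_far) where:
--     - action: 'visit' (adding to frontier), 'visited' (already processed),
--               'goal_found' (reached the goal)
--     - node: the node being acted upon
--     - path_so_far: the path from start to this node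
--     """
--     if start not in graph:
--         return
--
--     visited = {start}
--     frontier = deque([(start, [start])])
--
--     while frontier:
--         current, path = frontier.popleft()
--
--         yield ('visit', current, path)
--
--         if current == goal:
--             yield ('goal_found', current, path)
--             return
--
--         neighbors = graph.get(current, [])
--         for neighbor in neighbors:
--             if neighbor not in visited:
--                 visited.add(neighbor)
--                 new_path = path + [neighbor]
--                 frontier.append((neighbor, new_path))
--                 yield ('exploring', neighbor, new_path)
--
--         yield ('visited', current, path)
-- ===== SOURCE B (Python) =====
-- from collections import deque
--
--
-- def bfs_generator(graph, start, goal):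
--     """
--     Two-phase re-implementation: phase 1 runs a plain BFS (frontier of node
--     names, a paths dict) that only records, per dequeued node, a step record
--     (node, path, goal-flag, newly discovered children with their paths);
--     phase 2 renders the event stream from those step records.
--     """
--     if start not in graph:
--         return
--
--     steps = []
--     visited = {start}
--     paths = {start: [start]}
--     frontier = deque([start])
--
--     while frontier:
--         current = frontier.popleft()
--         path = paths[current]
--         if current == goal:
--             steps.append((current, path, True, []))
--             break
--         children = []
--         for neighbor in graph.get(current, []):
--             if neighbor not in visited:
--                 visited.add(neighbor)
--                 paths[neighbor] = path + [neighbor]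
--                 frontier.append(neighbor)
--                 children.append((neighbor, paths[neighbor]))
--         steps.append((current, path, False, children))
--
--     for current, path, found, children in steps:
--         yield ('visit', current, path)
--         if found:
--             yield ('goal_found', current, path)
--             return
--         for neighbor, npath in children:
--             yield ('exploring', neighbor, npath)
--         yield ('visited', current, path)
-- ===== Notes on version B (the rewrite author's own statement) =====
-- stated objective: alternative
-- what changed: A single-pass generator copying full paths through the frontier is replaced by a two-phase design: a plain name-frontier BFS with a paths dict that collects per-node step records (path, goal flag, newly discovered children), followed by a separate rendering pass that emits the event stream from those records.
import Mathlib
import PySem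

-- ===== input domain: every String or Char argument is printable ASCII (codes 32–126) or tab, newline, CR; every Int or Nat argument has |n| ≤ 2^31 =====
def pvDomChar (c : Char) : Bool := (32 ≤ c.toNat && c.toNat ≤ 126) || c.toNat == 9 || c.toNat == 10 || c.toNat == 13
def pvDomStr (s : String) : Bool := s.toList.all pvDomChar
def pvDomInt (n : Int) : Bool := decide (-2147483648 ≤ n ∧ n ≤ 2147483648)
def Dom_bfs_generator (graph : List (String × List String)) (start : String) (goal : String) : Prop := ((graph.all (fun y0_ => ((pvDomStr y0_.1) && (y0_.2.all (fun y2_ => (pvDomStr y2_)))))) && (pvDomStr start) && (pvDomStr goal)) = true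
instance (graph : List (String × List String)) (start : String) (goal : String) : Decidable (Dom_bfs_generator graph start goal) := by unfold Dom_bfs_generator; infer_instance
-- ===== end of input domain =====

-- B is a two-phase re-implementation (objective: alternative): phase 1 is a plain
-- BFS over node names with a paths dict that only collects step records; phase 2
-- renders the event stream from the records. Both ports use the same sufficient
-- fuel bound for the Python 'while frontier' loop (a totality guard only).

-- ===== PORT A =====
-- inner 'for neighbor in neighbors' loop of A: state (visited, frontier, events)
def pvInnerA (p : List String) :
    List String → PySem.Set String → List (String × List String) →
    List (String × String × Option (List String)) →
    PySem.Set String × List (String × List String) × List (String × String × Option (List String))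
  | [], V, fr, acc => (V, fr, acc)
  | n :: ns, V, fr, acc =>
    if PySem.Set.contains V n then pvInnerA p ns V fr acc
    else pvInnerA p ns (PySem.Set.add V n) (fr ++ [(n, p ++ [n])])
      (acc ++ [("exploring", n, some (p ++ [n]))])

-- outer 'while frontier' loop of A (fuel = totality guard only)
def pvLoopA (g : PySem.Dict String (List String)) (goal : String) :
    Nat → PySem.Set String → List (String × List String) →
    List (String × String × Option (List String)) →
    List (String × String × Option (List String))
  | 0, _, _, acc => acc
  | _ + 1, _, [], acc => acc
  | f + 1, V, (c, p) :: rest, acc =>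
    let acc := acc ++ [("visit", c, some p)]
    if c == goal then acc ++ [("goal_found", c, some p)]
    else
      let st := pvInnerA p (g.getD c []) V rest acc
      pvLoopA g goal f st.1 st.2.1 (st.2.2 ++ [("visited", c, some p)])

def bfs_generator (graph : List (String × List String)) (start : String) (goal : String) :
    List (String × String × Option (List String)) :=
  if !(PySem.Dict.mk graph).contains start then []
  else
    pvLoopA (PySem.Dict.mk graph) goal (graph.foldl (fun a kv => a + kv.2.length) 0 + 1)
      (PySem.Set.add PySem.Set.empty start) [(start, [start])] []

-- ===== PORT B =====
-- loop body of phase 1's 'for neighbor in graph.get(current, [])':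
-- state (visited, paths, frontier, children); children gets (n, paths[n])
def pvStepB (p : List String)
    (st : PySem.Set String × PySem.Dict String (List String) × List String ×
          List (String × List String)) (n : String) :
    PySem.Set String × PySem.Dict String (List String) × List String ×
      List (String × List String) :=
  if PySem.Set.contains st.1 n then st
  else
    let paths' := st.2.1.insert n (p ++ [n])
    (PySem.Set.add st.1 n, paths', st.2.2.1 ++ [n],
      st.2.2.2 ++ [(n, paths'.getD n [])])

-- phase 1: the 'while frontier' search loop, producing only step records
-- (node, its path, goal flag, newly discovered children); fuel = totality guard
def pvPhase1 (g : PySem.Dict String (List String)) (goal : String) :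
    Nat → PySem.Set String → PySem.Dict String (List String) → List String →
    List (String × List String × Bool × List (String × List String)) →
    List (String × List String × Bool × List (String × List String))
  | 0, _, _, _, steps => steps
  | _ + 1, _, _, [], steps => steps
  | f + 1, V, paths, c :: rest, steps =>
    let p := paths.getD c []
    if c == goal then steps ++ [(c, p, true, [])]
    else
      let st := (g.getD c []).foldl (pvStepB p) (V, paths, rest, [])
      pvPhase1 g goal f st.1 st.2.1 st.2.2.1 (steps ++ [(c, p, false, st.2.2.2)])

-- phase 2: render the event stream from the step records
def pvRender : List (String × List String × Bool × List (String × List String)) →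
    List (String × String × Option (List String))
  | [] => []
  | (c, p, found, ch) :: rest =>
    ("visit", c, some p) ::
      if found then [("goal_found", c, some p)]
      else ch.map (fun e => ("exploring", e.1, some e.2)) ++
        ("visited", c, some p) :: pvRender rest

def bfs_generator_alt (graph : List (String × List String)) (start : String) (goal : String) :
    List (String × String × Option (List String)) :=
  if !(PySem.Dict.mk graph).contains start then []
  else
    pvRender (pvPhase1 (PySem.Dict.mk graph) goal
      (graph.foldl (fun a kv => a + kv.2.length) 0 + 1)
      (PySem.Set.add PySem.Set.empty start)
      (PySem.Dict.empty.insert start [start]) [start] [])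

-- ===== PRECONDITION & SPEC =====
def Spec_bfs_generator (graph : List (String × List String)) (start : String) (goal : String) (out : List (String × String × Option (List String))) : Prop := out = bfs_generator_alt graph start goal
instance (graph : List (String × List String)) (start : String) (goal : String) (out : List (String × String × Option (List String))) : Decidable (Spec_bfs_generator graph start goal out) := by unfold Spec_bfs_generator; infer_instance

-- ===== CLAIM =====
def Claim_equal_bfs_generator : Prop := ∀ (graph : List (String × List String)) (start : String) (goal : String), Dom_bfs_generator graph start goal → Spec_bfs_generator graph start goal (bfs_generator graph start goal)

-- ===== LEMMAS AND PROOFS =====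

-- invariant tying A's (node, path) frontier to B's name frontier + paths dict:
-- entries line up, every frontier name is visited, and paths holds its path
def pvInv (paths : PySem.Dict String (List String)) (V : PySem.Set String)
    (frA : List (String × List String)) (frB : List String) : Prop :=
  List.Forall₂ (fun pr n => pr.1 = n ∧ n ∈ V ∧ paths.get? n = some pr.2) frA frB

theorem pvPhase1_acc (g : PySem.Dict String (List String)) (goal : String) :
    ∀ (f : Nat) V paths fr steps,
      pvPhase1 g goal f V paths fr steps = steps ++ pvPhase1 g goal f V paths fr [] := by
  intro f
  induction f with
  | zero => intro V paths fr steps; simp [pvPhase1]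
  | succ f ih =>
    intro V paths fr steps
    cases fr with
    | nil => simp [pvPhase1]
    | cons c rest =>
      simp only [pvPhase1]
      split
      · simp
      · rw [ih _ _ _ (steps ++ _), ih _ _ _ ([] ++ _)]
        simp

theorem pvInner_eq (p : List String) (ns : List String) :
    ∀ (V : PySem.Set String) (paths : PySem.Dict String (List String))
      (frA : List (String × List String)) (frB : List String)
      (acc : List (String × String × Option (List String)))
      (ch : List (String × List String)),
      pvInv paths V frA frB →
      ∃ kids,
        (ns.foldl (pvStepB p) (V, paths, frB, ch)).2.2.2 = ch ++ kids ∧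
        (pvInnerA p ns V frA acc).2.2 =
          acc ++ kids.map (fun e => ("exploring", e.1, some e.2)) ∧
        (pvInnerA p ns V frA acc).1 = (ns.foldl (pvStepB p) (V, paths, frB, ch)).1 ∧
        pvInv (ns.foldl (pvStepB p) (V, paths, frB, ch)).2.1
          (ns.foldl (pvStepB p) (V, paths, frB, ch)).1
          (pvInnerA p ns V frA acc).2.1
          (ns.foldl (pvStepB p) (V, paths, frB, ch)).2.2.1 := by
  induction ns with
  | nil =>
    intro V paths frA frB acc ch hinv
    exact ⟨[], by simp, by simp [pvInnerA], rfl, hinv⟩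
  | cons n ns ih =>
    intro V paths frA frB acc ch hinv
    by_cases hmem : n ∈ V
    · have hA : pvInnerA p (n :: ns) V frA acc = pvInnerA p ns V frA acc := by
        simp [pvInnerA, PySem.Set.contains, hmem]
      have hB : (n :: ns).foldl (pvStepB p) (V, paths, frB, ch) =
          ns.foldl (pvStepB p) (V, paths, frB, ch) := by
        simp [List.foldl, pvStepB, PySem.Set.contains, hmem]
      rw [hA, hB]
      exact ih V paths frA frB acc ch hinv
    · have hA : pvInnerA p (n :: ns) V frA acc =
          pvInnerA p ns (PySem.Set.add V n) (frA ++ [(n, p ++ [n])])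
            (acc ++ [("exploring", n, some (p ++ [n]))]) := by
        simp [pvInnerA, PySem.Set.contains, hmem]
      have hB : (n :: ns).foldl (pvStepB p) (V, paths, frB, ch) =
          ns.foldl (pvStepB p) (PySem.Set.add V n, paths.insert n (p ++ [n]),
            frB ++ [n], ch ++ [(n, p ++ [n])]) := by
        simp [List.foldl, pvStepB, PySem.Set.contains, hmem, PySem.Dict.getD,
          PySem.Dict.get?_insert_self, Option.getD_some]
      have hinv' : pvInv (paths.insert n (p ++ [n])) (PySem.Set.add V n)
          (frA ++ [(n, p ++ [n])]) (frB ++ [n]) := by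
        refine List.rel_append ?_ ?_
        · refine hinv.imp ?_
          rintro pr m ⟨h1, h2, h3⟩
          refine ⟨h1, by simp [PySem.Set.mem_add, h2], ?_⟩
          have hne : m ≠ n := fun e => hmem (e ▸ h2)
          rw [PySem.Dict.get?_insert_of_ne _ _ hne, h3]
        · refine List.Forall₂.cons ⟨rfl, by simp [PySem.Set.mem_add], ?_⟩ List.Forall₂.nil
          exact PySem.Dict.get?_insert_self _ _ _
      rw [hA, hB]
      obtain ⟨kids, hk1, hk2, hk3, hk4⟩ :=
        ih (PySem.Set.add V n) (paths.insert n (p ++ [n])) (frA ++ [(n, p ++ [n])])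
          (frB ++ [n]) (acc ++ [("exploring", n, some (p ++ [n]))])
          (ch ++ [(n, p ++ [n])]) hinv'
      exact ⟨(n, p ++ [n]) :: kids, by simpa using hk1, by simpa using hk2, hk3, hk4⟩

theorem pvLoop_eq (g : PySem.Dict String (List String)) (goal : String) :
    ∀ (f : Nat) (V : PySem.Set String) (paths : PySem.Dict String (List String))
      (frA : List (String × List String)) (frB : List String)
      (acc : List (String × String × Option (List String))),
      pvInv paths V frA frB →
      pvLoopA g goal f V frA acc = acc ++ pvRender (pvPhase1 g goal f V paths frB []) := by
  intro f
  induction f with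
  | zero => intro V paths frA frB acc _; simp [pvLoopA, pvPhase1, pvRender]
  | succ f ih =>
    intro V paths frA frB acc hinv
    cases hinv with
    | nil => simp [pvLoopA, pvPhase1, pvRender]
    | @cons pr c restA rest hhd htl =>
      obtain ⟨cc, p⟩ := pr
      obtain ⟨h1, h2, h3⟩ := hhd
      simp only at h1
      subst h1
      have hp : paths.getD cc [] = p := by simp [PySem.Dict.getD, h3]
      cases hg : cc == goal with
      | true => simp [pvLoopA, pvPhase1, pvRender, hg, hp]
      | false =>
        obtain ⟨kids, hk1, hk2, hk3, hk4⟩ :=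
          pvInner_eq p (g.getD cc []) V paths restA rest
            (acc ++ [("visit", cc, some p)]) [] htl
        simp only [pvLoopA, pvPhase1, hg, Bool.false_eq_true, if_false, hp]
        rw [hk2, hk3, pvPhase1_acc]
        rw [ih _ _ _ _ _ hk4]
        simp [pvRender, hk1]

-- ===== VERDICT =====
theorem bfs_generator_spec : Claim_equal_bfs_generator := by
  intro graph start goal _
  unfold Spec_bfs_generator
  simp only [bfs_generator, bfs_generator_alt]
  cases hc : (PySem.Dict.mk graph).contains start with
  | false => simp
  | true =>
    simp only [Bool.not_true, Bool.false_eq_true, if_false]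
    have hinv0 : pvInv (PySem.Dict.empty.insert start [start])
        (PySem.Set.add PySem.Set.empty start) [(start, [start])] [start] := by
      refine List.Forall₂.cons ⟨rfl, by simp, ?_⟩ List.Forall₂.nil
      exact PySem.Dict.get?_insert_self _ _ _
    rw [pvLoop_eq _ _ _ _ _ _ _ _ hinv0]
    simp
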